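-- pv_equiv track=rewrite | github.com/alina-gurjeva/algorythms | task1.py | count_even_uneven3
-- ===== SOURCE A (Python) =====
-- def count_even_uneven3(a):
--     even_nums = {'0', '2', '4', '6', '8'}
--     even = 0
--     uneven = 0
--     a = str(a)
--     for element in a:
--         if element in even_nums:
--             even += 1
--         else:
--             uneven += 1
--     return even, uneven
-- ===== SOURCE B (Python) =====
-- def count_even_uneven3(a):
--     s = str(a)
--     even = sum(s.count(d) for d in '02468')
--     return even, len(s) - even
-- ===== Notes on version B (the rewrite author's own statement) =====
-- stated objective: alternative
-- what changed: Instead of one branching pass with two counters, B does targeted s.count scans for each even digit and derives the uneven count by subtraction from the string length.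
import Mathlib
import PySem

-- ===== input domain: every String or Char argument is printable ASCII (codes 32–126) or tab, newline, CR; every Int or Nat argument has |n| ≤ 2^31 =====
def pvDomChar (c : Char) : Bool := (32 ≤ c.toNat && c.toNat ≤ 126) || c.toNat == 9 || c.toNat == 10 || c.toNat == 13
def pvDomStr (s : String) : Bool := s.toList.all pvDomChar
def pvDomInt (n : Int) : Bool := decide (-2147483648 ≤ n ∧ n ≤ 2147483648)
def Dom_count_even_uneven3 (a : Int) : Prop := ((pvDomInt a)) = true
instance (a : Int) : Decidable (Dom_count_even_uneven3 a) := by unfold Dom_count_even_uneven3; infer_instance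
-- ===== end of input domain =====

-- B replaces A's single branching pass with two counters by five targeted digit-count scans
-- plus a closed-form subtraction for the uneven count (objective: alternative decomposition).

-- ===== PORT A =====
def count_even_uneven3 (a : Int) : Int × Int :=
  let even_nums : PySem.Set Char := PySem.Set.ofList ['0', '2', '4', '6', '8']
  let s := PySem.Int.toStr a
  s.toList.foldl
    (fun (acc : Int × Int) element =>
      if PySem.Set.contains even_nums element then (acc.1 + 1, acc.2)
      else (acc.1, acc.2 + 1))
    (0, 0)

-- ===== PORT B =====
def count_even_uneven3_alt (a : Int) : Int × Int :=
  let s := PySem.Int.toStr a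
  let even : Int := (("02468".toList).map (fun d => (PySem.Str.count s (String.ofList [d]) : Int))).sum
  (even, (PySem.Str.len s : Int) - even)

-- ===== PRECONDITION & SPEC =====
def Spec_count_even_uneven3 (a : Int) (out : Int × Int) : Prop := out = count_even_uneven3_alt a
instance (a : Int) (out : Int × Int) : Decidable (Spec_count_even_uneven3 a out) := by unfold Spec_count_even_uneven3; infer_instance

-- ===== CLAIM (what is proved, stated in full; the proofs are below) =====
def Claim_equal_count_even_uneven3 : Prop := ∀ (a : Int), Dom_count_even_uneven3 a → Spec_count_even_uneven3 a (count_even_uneven3 a)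

-- ===== LEMMAS AND PROOFS =====

-- single-character substring count is plain element count
lemma count_go_single (d : Char) : ∀ (l : List Char) (fuel acc : Nat), l.length ≤ fuel →
    PySem.Chars.count.go [d] fuel l acc = acc + l.count d := by
  intro l
  induction l with
  | nil => intro fuel acc _; cases fuel <;> simp [PySem.Chars.count.go]
  | cons h t ih =>
    intro fuel acc hf
    cases fuel with
    | zero => simp at hf
    | succ f =>
      simp only [List.length_cons, Nat.succ_le_succ_iff] at hf
      simp only [PySem.Chars.count.go, List.isPrefixOf, Bool.and_true,
        List.length_cons, List.length_nil, List.drop_succ_cons, List.drop_zero]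
      by_cases hd : d = h
      · subst hd
        rw [if_pos (by simp), ih f (acc + 1) hf, List.count_cons]
        simp; omega
      · rw [if_neg (by simp [hd]), ih f acc hf, List.count_cons]
        simp [Ne.symm hd]

lemma chars_count_single (l : List Char) (d : Char) :
    PySem.Chars.count l [d] = l.count d := by
  simp only [PySem.Chars.count, List.isEmpty_cons, if_false, Bool.false_eq_true]
  have := count_go_single d l l.length 0 le_rfl
  omega

-- the per-character selector: among the five distinct even digits at most one matches
lemma sum_digit_ind (c : Char) :
    ((['0','2','4','6','8'] : List Char).map (fun d => if d == c then (1 : Int) else 0)).sum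
      = if (['0','2','4','6','8'] : List Char).contains c then 1 else 0 := by
  by_cases h0 : c = '0'
  · subst h0; decide
  by_cases h2 : c = '2'
  · subst h2; decide
  by_cases h4 : c = '4'
  · subst h4; decide
  by_cases h6 : c = '6'
  · subst h6; decide
  by_cases h8 : c = '8'
  · subst h8; decide
  simp only [List.map_cons, List.map_nil, List.sum_cons, List.sum_nil,
    List.contains_cons, List.contains_nil, beq_iff_eq]
  simp only [eq_comm]
  simp [h0, h2, h4, h6, h8]

-- sum of the five per-digit counts is the countP of being an even digit
lemma sum_counts_eq_countP (l : List Char) :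
    ((['0','2','4','6','8'] : List Char).map (fun d => (l.count d : Int))).sum
      = (l.countP (fun c => (['0','2','4','6','8'] : List Char).contains c) : Int) := by
  induction l with
  | nil => simp
  | cons c t ih =>
    have hcnt : ∀ d : Char, ((c :: t).count d : Int) = (t.count d : Int) + (if d == c then 1 else 0) := by
      intro d; rw [List.count_cons]
      by_cases h : d = c
      · subst h; simp
      · simp [h, Ne.symm h]
    have : ((['0','2','4','6','8'] : List Char).map (fun d => ((c :: t).count d : Int))).sum
        = ((['0','2','4','6','8'] : List Char).map (fun d => (t.count d : Int))).sum
          + ((['0','2','4','6','8'] : List Char).map (fun d => if d == c then (1 : Int) else 0)).sum := by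
      simp only [hcnt, List.map_cons, List.map_nil, List.sum_cons, List.sum_nil]; ring
    rw [this, ih, sum_digit_ind, List.countP_cons]
    by_cases hc : (['0','2','4','6','8'] : List Char).contains c = true
    · rw [if_pos hc, if_pos hc]; push_cast; ring
    · rw [if_neg hc, if_neg hc]; push_cast; ring

lemma foldA (l : List Char) (e u : Int) :
    l.foldl
      (fun (acc : Int × Int) element =>
        if PySem.Set.contains (PySem.Set.ofList ['0','2','4','6','8']) element then (acc.1 + 1, acc.2)
        else (acc.1, acc.2 + 1)) (e, u)
    = (e + (l.countP (fun c => (['0','2','4','6','8'] : List Char).contains c) : Int),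
       u + ((l.length : Int) - (l.countP (fun c => (['0','2','4','6','8'] : List Char).contains c) : Int))) := by
  have hset : PySem.Set.ofList (['0','2','4','6','8'] : List Char) = ['0','2','4','6','8'] := by decide
  induction l generalizing e u with
  | nil => simp
  | cons c t ih =>
    simp only [List.foldl_cons]
    by_cases hc : PySem.Set.contains (PySem.Set.ofList ['0','2','4','6','8']) c = true
    · rw [if_pos hc, ih]
      have : (['0','2','4','6','8'] : List Char).contains c = true := by
        rw [hset] at hc; exact hc
      rw [List.countP_cons, this]
      simp only [Prod.mk.injEq, List.length_cons, if_true]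
      push_cast
      omega
    · rw [if_neg hc, ih]
      have : (['0','2','4','6','8'] : List Char).contains c = false := by
        rw [hset] at hc; simpa using hc
      rw [List.countP_cons, this]
      simp only [Prod.mk.injEq, List.length_cons, if_false, Bool.false_eq_true]
      push_cast
      omega

-- ===== VERDICT (by name: the statement is the Claim_ definition above) =====
theorem count_even_uneven3_spec : Claim_equal_count_even_uneven3 := by
  intro a _
  unfold Spec_count_even_uneven3 count_even_uneven3 count_even_uneven3_alt
  simp only [PySem.Str.count_eq, PySem.Str.len_eq]
  rw [foldA]
  have hmap : ∀ d : Char, PySem.Chars.count (PySem.Int.toStr a).toList (String.ofList [d]).toList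
      = (PySem.Int.toStr a).toList.count d := by
    intro d
    rw [show (String.ofList [d]).toList = [d] by simp, chars_count_single]
  simp only [hmap]
  rw [show ("02468".toList : List Char) = ['0','2','4','6','8'] from rfl,
    sum_counts_eq_countP]
  simp
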